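-- pv_equiv track=rewrite | github.com/Conut-1/Python_Learning | 프로그래머스/Lv.1/명예의 전당 (1).py | solution
-- ===== SOURCE A (Python) =====
-- def solution(k, score):
--     answer = []
--     fame = []
--     for s in score:
--         for i in range(k):
--             if i >= len(fame):
--                 fame.append(s)
--                 break
--             if s >= fame[i]:
--                 fame[i], s = s, fame[i]
--         answer.append(fame[-1])
--     return answer
-- ===== SOURCE B (Python) =====
-- def solution(k, score):
--     answer = []
--     fame = []  # ascending; at most k entries, the top scores so far
--     for s in score:
--         # binary search for the insertion point after any equal scores
--         lo, hi = 0, len(fame)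
--         while lo < hi:
--             mid = (lo + hi) // 2
--             if fame[mid] <= s:
--                 lo = mid + 1
--             else:
--                 hi = mid
--         fame.insert(lo, s)
--         if len(fame) > k:
--             fame.pop(0)
--         answer.append(fame[0])
--     return answer
-- ===== Notes on version B (the rewrite author's own statement) =====
-- stated objective: faster
-- what changed: B keeps the honor roll ascending and finds each insertion point by hand-written binary search (then one insert and, when full, one pop of the minimum), instead of A's per-element swap scan over range(k).
import Mathlib
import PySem

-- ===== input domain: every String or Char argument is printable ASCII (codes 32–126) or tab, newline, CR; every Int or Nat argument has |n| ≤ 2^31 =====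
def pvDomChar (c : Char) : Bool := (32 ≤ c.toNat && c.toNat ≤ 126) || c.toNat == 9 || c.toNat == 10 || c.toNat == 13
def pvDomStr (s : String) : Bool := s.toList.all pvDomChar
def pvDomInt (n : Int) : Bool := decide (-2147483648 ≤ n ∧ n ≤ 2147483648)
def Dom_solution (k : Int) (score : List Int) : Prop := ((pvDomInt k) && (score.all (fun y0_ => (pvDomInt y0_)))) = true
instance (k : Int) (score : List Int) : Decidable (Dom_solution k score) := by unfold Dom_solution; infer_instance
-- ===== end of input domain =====

-- B replaces A's per-element swap scan over range(k) with a binary search for the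
-- insertion point in an ascending honor roll (objective: faster, constant-factor).
-- Equivalence is about the return value; neither argument is mutated by the ports.

-- ===== PORT A =====
-- inner 'for i in range(k)' loop of A: fuel counts the remaining iterations
-- (fuel starts at k.toNat = number of iterations of range(k) for k ≥ 0; for k < 0
-- range(k) is empty, matching toNat = 0); i is the current index; breaks translate
-- to returning fame.  fame.getD i 0 is exact for fame[i]: the branch guarantees i < len(fame).
def pvLoopA : Nat → Nat → List Int → Int → List Int
  | 0, _, fame, _ => fame
  | fuel+1, i, fame, s =>
    if i ≥ fame.length then fame ++ [s]
    else if s ≥ fame.getD i 0 then pvLoopA fuel (i+1) (fame.set i s) (fame.getD i 0)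
    else pvLoopA fuel (i+1) fame s

-- fame[-1] raises IndexError when fame is empty (k ≤ 0 with nonempty score):
-- excluded by Pre_solution, so the getD default is never the result there.
def solution (k : Int) (score : List Int) : List Int :=
  (score.foldl (fun st s =>
      let fame := pvLoopA k.toNat 0 st.2 s
      (st.1 ++ [PySem.List.pyGetD fame (-1) 0], fame)) (([] : List Int), ([] : List Int))).1

-- ===== PORT B =====
-- the hand-written 'while lo < hi' binary search of Source B; lo, hi stay in [0, len fame],
-- so Nat and Nat division (= Python // on nonnegatives) are exact; fame.getD mid 0 is
-- exact for fame[mid] since lo ≤ mid < hi ≤ len fame.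
def pvBSearch (fame : List Int) (s : Int) (lo hi : Nat) : Nat :=
  if h : lo < hi then
    let mid := (lo + hi) / 2
    if fame.getD mid 0 ≤ s then pvBSearch fame s (mid+1) hi
    else pvBSearch fame s lo mid
  else lo
termination_by hi - lo
decreasing_by
  · have : (lo + hi) / 2 < hi := Nat.div_lt_of_lt_mul (by omega)
    omega
  · have : lo ≤ (lo + hi) / 2 := Nat.le_div_iff_mul_le (by omega) |>.mpr (by omega)
    have : (lo + hi) / 2 < hi := Nat.div_lt_of_lt_mul (by omega)
    omega

-- fame[0] after the trim raises IndexError exactly when k ≤ 0 with nonempty score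
-- (excluded by Pre_solution); fame.pop(0) is PySem.List.pop? fame1 0.
def solution_alt (k : Int) (score : List Int) : List Int :=
  (score.foldl (fun st s =>
      let lo := pvBSearch st.2 s 0 st.2.length
      let fame1 := PySem.List.insert st.2 (lo : Int) s
      let fame2 := if k < (fame1.length : Int) then
          ((PySem.List.pop? fame1 0).map Prod.snd).getD fame1 else fame1
      (st.1 ++ [PySem.List.pyGetD fame2 0 0], fame2)) (([] : List Int), ([] : List Int))).1

-- ===== PRECONDITION & SPEC =====
-- Pre_ excludes exactly the inputs where the Python A raises: for k ≤ 0 and a nonempty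
-- score both A (fame[-1] on the empty honor roll) and B (fame[0]) raise IndexError.
def Pre_solution (k : Int) (score : List Int) : Prop := 1 ≤ k ∨ score = []
instance (k : Int) (score : List Int) : Decidable (Pre_solution k score) := by
  unfold Pre_solution; infer_instance

def pvWitness_solution : Int × List Int := (3, [10, 100, 20, 150, 1, 100, 200])

def Spec_solution (k : Int) (score : List Int) (out : List Int) : Prop := out = solution_alt k score
instance (k : Int) (score : List Int) (out : List Int) : Decidable (Spec_solution k score out) := by unfold Spec_solution; infer_instance

-- ===== CLAIM (what is proved, stated in full; the proofs are below) =====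
def Claim_equal_solution : Prop := ∀ (k : Int) (score : List Int), Dom_solution k score → Pre_solution k score → Spec_solution k score (solution k score)

-- ===== LEMMAS AND PROOFS =====

-- canonical descending insertion (what A's swap scan performs)
def pvDins (s : Int) : List Int → List Int
  | [] => [s]
  | x :: xs => if s ≥ x then s :: x :: xs else x :: pvDins s xs

-- canonical ascending insertion after equal elements (what B's binary search finds)
def pvAins (s : Int) : List Int → List Int
  | [] => [s]
  | x :: xs => if x ≤ s then x :: pvAins s xs else s :: x :: xs

lemma pvMem_dins {y s : Int} {l : List Int} (h : y ∈ pvDins s l) : y = s ∨ y ∈ l := by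
  induction l with
  | nil => simpa [pvDins] using h
  | cons x xs ih =>
    by_cases hx : s ≥ x
    · simpa [pvDins, hx] using h
    · simp only [pvDins, if_neg hx, List.mem_cons] at h
      rcases h with h | h
      · right; simp [h]
      · rcases ih h with h | h
        · left; exact h
        · right; simp [h]

lemma pvDins_length (s : Int) (l : List Int) : (pvDins s l).length = l.length + 1 := by
  induction l with
  | nil => simp [pvDins]
  | cons x xs ih => by_cases hx : s ≥ x <;> simp [pvDins, hx, ih]

lemma pvDins_pairwise {s : Int} {l : List Int} (h : l.Pairwise (fun a b => b ≤ a)) :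
    (pvDins s l).Pairwise (fun a b => b ≤ a) := by
  induction l with
  | nil => simp [pvDins]
  | cons x xs ih =>
    rcases List.pairwise_cons.mp h with ⟨hx, hxs⟩
    by_cases hsx : s ≥ x
    · rw [pvDins, if_pos hsx]
      refine List.pairwise_cons.mpr ⟨?_, List.pairwise_cons.mpr ⟨hx, hxs⟩⟩
      intro y hy
      rcases List.mem_cons.mp hy with rfl | hy
      · exact hsx
      · exact le_trans (hx y hy) hsx
    · rw [pvDins, if_neg hsx]
      refine List.pairwise_cons.mpr ⟨?_, ih hxs⟩
      intro y hy
      rcases pvMem_dins hy with rfl | hy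
      · omega
      · exact hx y hy

lemma pvDins_of_head_ge {x : Int} {l : List Int} (h : ∀ y ∈ l, y ≤ x) :
    pvDins x l = x :: l := by
  cases l with
  | nil => rfl
  | cons y ys => simp [pvDins, h y (by simp)]

lemma pvAins_of_all_le {s : Int} {l : List Int} (h : ∀ y ∈ l, y ≤ s) :
    pvAins s l = l ++ [s] := by
  induction l with
  | nil => rfl
  | cons x xs ih =>
    rw [pvAins, if_pos (h x (by simp)), ih (fun y hy => h y (by simp [hy]))]
    simp

lemma pvAins_append_gt {s x : Int} (hx : s < x) (l : List Int) :
    pvAins s (l ++ [x]) = pvAins s l ++ [x] := by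
  induction l with
  | nil => simp [pvAins, not_le.mpr hx]
  | cons y ys ih =>
    by_cases hy : y ≤ s <;> simp [pvAins, hy, ih]

-- reversing a descending insert is an ascending insert (on a descending-sorted list)
lemma pvDins_reverse {s : Int} {l : List Int} (h : l.Pairwise (fun a b => b ≤ a)) :
    (pvDins s l).reverse = pvAins s l.reverse := by
  induction l with
  | nil => rfl
  | cons x xs ih =>
    rcases List.pairwise_cons.mp h with ⟨hx, hxs⟩
    by_cases hsx : s ≥ x
    · rw [pvDins, if_pos hsx, pvAins_of_all_le (s := s) (l := (x :: xs).reverse)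
        (by intro y hy; rw [List.mem_reverse] at hy
            rcases List.mem_cons.mp hy with rfl | hy
            · exact hsx
            · exact le_trans (hx y hy) hsx)]
      simp
    · rw [pvDins, if_neg hsx]
      have : (x :: xs).reverse = xs.reverse ++ [x] := by simp
      rw [this, pvAins_append_gt (by omega), ← ih hxs]
      simp

-- ===== A's inner loop computes a truncated descending insert =====

def pvLoopA' : Nat → List Int → Int → List Int
  | 0, rest, _ => rest
  | _+1, [], s => [s]
  | fuel+1, x :: xs, s => if s ≥ x then s :: pvLoopA' fuel xs x else x :: pvLoopA' fuel xs s

lemma pvLoopA_shift (fuel : Nat) : ∀ (pre rest : List Int) (s : Int),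
    pvLoopA fuel pre.length (pre ++ rest) s = pre ++ pvLoopA' fuel rest s := by
  induction fuel with
  | zero => intro pre rest s; rfl
  | succ fuel ih =>
    intro pre rest s
    cases rest with
    | nil => simp [pvLoopA, pvLoopA']
    | cons x xs =>
      have hget : (pre ++ x :: xs).getD pre.length 0 = x := by
        rw [List.getD_eq_getElem?_getD, List.getElem?_append_right (le_refl _)]
        simp
      have hset : (pre ++ x :: xs).set pre.length s = pre ++ s :: xs := by
        rw [List.set_append]
        simp
      rw [pvLoopA, if_neg (by simp), hget]
      by_cases hs : s ≥ x
      · rw [if_pos hs]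
        have h1 : pre.length + 1 = (pre ++ [s]).length := by simp
        have h2 : pre ++ s :: xs = (pre ++ [s]) ++ xs := by simp
        rw [hset, h1, h2, ih (pre ++ [s]) xs x]
        simp [pvLoopA', hs]
      · rw [if_neg hs]
        have h1 : pre.length + 1 = (pre ++ [x]).length := by simp
        have h2 : pre ++ x :: xs = (pre ++ [x]) ++ xs := by simp
        rw [h1, h2, ih (pre ++ [x]) xs s]
        simp [pvLoopA', hs]

lemma pvLoopA'_eq (fuel : Nat) : ∀ (l : List Int) (s : Int),
    l.Pairwise (fun a b => b ≤ a) → l.length ≤ fuel →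
    pvLoopA' fuel l s = (pvDins s l).take fuel := by
  induction fuel with
  | zero =>
    intro l s _ hlen
    have : l = [] := List.length_eq_zero_iff.mp (by omega)
    subst this; rfl
  | succ fuel ih =>
    intro l s hs hlen
    cases l with
    | nil => simp [pvLoopA', pvDins]
    | cons x xs =>
      rcases List.pairwise_cons.mp hs with ⟨hx, hxs⟩
      by_cases hsx : s ≥ x
      · rw [pvLoopA', if_pos hsx, pvDins, if_pos hsx, ih xs x hxs (by simp at hlen; omega),
          pvDins_of_head_ge hx]
        simp
      · rw [pvLoopA', if_neg hsx, pvDins, if_neg hsx, ih xs s hxs (by simp at hlen; omega)]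
        simp

lemma pvLoopA_eq {k : Int} {l : List Int} (s : Int)
    (h : l.Pairwise (fun a b => b ≤ a)) (hlen : l.length ≤ k.toNat) :
    pvLoopA k.toNat 0 l s = (pvDins s l).take k.toNat := by
  have := pvLoopA_shift k.toNat [] l s
  simpa [pvLoopA'_eq k.toNat l s h hlen] using this

-- ===== B's binary search finds the upper bound =====

lemma pvTake_length_takeWhile (p : Int → Bool) (l : List Int) :
    l.take (l.takeWhile p).length = l.takeWhile p := by
  induction l with
  | nil => rfl
  | cons x xs ih => by_cases hx : p x <;> simp [hx, ih]

lemma pvDrop_length_takeWhile (p : Int → Bool) (l : List Int) :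
    l.drop (l.takeWhile p).length = l.dropWhile p := by
  induction l with
  | nil => rfl
  | cons x xs ih => by_cases hx : p x <;> simp [hx, ih]

lemma pvUb_le_length (p : Int → Bool) (l : List Int) : (l.takeWhile p).length ≤ l.length :=
  List.Sublist.length_le (List.takeWhile_sublist p)

lemma pvUb_spec {s : Int} {l : List Int} (h : l.Pairwise (· ≤ ·)) (j : Nat) (hj : j < l.length) :
    l[j] ≤ s ↔ j < ((l.takeWhile (fun x => x ≤ s)).length) := by
  set u := (l.takeWhile (fun x : Int => x ≤ s)).length with hu
  constructor
  · intro hle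
    by_contra hlt
    push Not at hlt
    -- u ≤ j, so l[u] exists and fails the predicate; sortedness pushes the failure to j
    have hu_lt : u < l.length := lt_of_le_of_lt hlt hj
    have hfail : ¬ ((l[u] : Int) ≤ s) := by
      have hd : l.drop u = l.dropWhile (fun x : Int => x ≤ s) := pvDrop_length_takeWhile _ l
      have h0 : (l.drop u)[0]'(by simp; omega) = l[u] := by
        simp [List.getElem_drop]
      have hlen0 : 0 < (l.dropWhile (fun x : Int => x ≤ s)).length := by
        rw [← hd]; simp; omega
      have hnot := List.dropWhile_get_zero_not (p := fun x : Int => x ≤ s) l hlen0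
      simp only [List.get_eq_getElem] at hnot
      have e1 : (l.dropWhile (fun x : Int => x ≤ s))[0]'hlen0 = l[u] :=
        (List.getElem_of_eq hd.symm hlen0).trans h0
      simp only [decide_eq_true_eq] at hnot
      rw [e1] at hnot
      exact hnot
    rcases lt_or_eq_of_le hlt with hlt' | rfl
    · exact hfail (le_trans (List.pairwise_iff_getElem.mp h u j hu_lt hj hlt') hle)
    · exact hfail hle
  · intro hlt
    have : l[j] ∈ l.takeWhile (fun x : Int => x ≤ s) := by
      rw [← pvTake_length_takeWhile (fun x : Int => x ≤ s) l]
      have : (l.take u)[j]'(by simp; omega) = l[j] := List.getElem_take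
      rw [← this]
      exact List.getElem_mem _
    simpa using List.mem_takeWhile_imp this

lemma pvBSearch_eq {s : Int} {l : List Int} (h : l.Pairwise (· ≤ ·)) :
    ∀ lo hi, lo ≤ (l.takeWhile (fun x => x ≤ s)).length →
      (l.takeWhile (fun x => x ≤ s)).length ≤ hi → hi ≤ l.length →
      pvBSearch l s lo hi = (l.takeWhile (fun x => x ≤ s)).length := by
  intro lo hi
  induction lo, hi using pvBSearch.induct l s with
  | case1 lo hi hlt mid hmid ih =>
    intro h1 h2 h3
    rw [pvBSearch, dif_pos hlt, if_pos hmid]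
    have hmlt : mid < l.length := by
      have : mid < hi := Nat.div_lt_of_lt_mul (by omega)
      omega
    have : mid < (l.takeWhile (fun x => x ≤ s)).length := by
      have hg : l.getD mid 0 = l[mid] := List.getD_eq_getElem l 0 hmlt
      exact (pvUb_spec h mid hmlt).mp (by rw [← hg]; exact hmid)
    exact ih this h2 h3
  | case2 lo hi hlt mid hmid ih =>
    intro h1 h2 h3
    rw [pvBSearch, dif_pos hlt, if_neg hmid]
    have hmlt : mid < l.length := by
      have : mid < hi := Nat.div_lt_of_lt_mul (by omega)
      omega
    have hlo : lo ≤ mid := Nat.le_div_iff_mul_le (by omega) |>.mpr (by omega)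
    have : (l.takeWhile (fun x => x ≤ s)).length ≤ mid := by
      by_contra hc
      push Not at hc
      exact hmid ((List.getD_eq_getElem l 0 hmlt) ▸ ((pvUb_spec h mid hmlt).mpr hc))
    exact ih h1 this (by omega)
  | case3 lo hi hge =>
    intro h1 h2 h3
    rw [pvBSearch, dif_neg hge]
    omega

lemma pvAins_eq_takeWhile_dropWhile (s : Int) (l : List Int) :
    pvAins s l = l.takeWhile (fun x => x ≤ s) ++ s :: l.dropWhile (fun x => x ≤ s) := by
  induction l with
  | nil => rfl
  | cons x xs ih => by_cases hx : x ≤ s <;> simp [pvAins, hx, ih]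

lemma pvInsert_ub (s : Int) (l : List Int) :
    PySem.List.insert l (((l.takeWhile (fun x => x ≤ s)).length : Int)) s = pvAins s l := by
  rw [PySem.List.insert_natCast l _ s (pvUb_le_length _ l),
    pvTake_length_takeWhile, pvDrop_length_takeWhile, pvAins_eq_takeWhile_dropWhile]

-- ===== one synchronized step and the fold =====

lemma pvStepB_eq {k : Int} (hk : 1 ≤ k) {fame : List Int}
    (hs : fame.Pairwise (fun a b => b ≤ a)) (hlen : fame.length ≤ k.toNat) (s : Int) :
    (let lo := pvBSearch fame.reverse s 0 fame.reverse.length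
     let fame1 := PySem.List.insert fame.reverse (lo : Int) s
     if k < (fame1.length : Int) then
       ((PySem.List.pop? fame1 0).map Prod.snd).getD fame1 else fame1)
    = ((pvDins s fame).take k.toNat).reverse := by
  have hrev : fame.reverse.Pairwise (· ≤ ·) := by
    rw [List.pairwise_reverse]; exact hs
  have hbs : pvBSearch fame.reverse s 0 fame.reverse.length
      = (fame.reverse.takeWhile (fun x => x ≤ s)).length :=
    pvBSearch_eq hrev 0 fame.reverse.length (by omega) (pvUb_le_length _ _) (le_refl _)
  simp only [hbs, pvInsert_ub s fame.reverse, ← pvDins_reverse hs]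
  have hlen1 : (pvDins s fame).reverse.length = fame.length + 1 := by
    simp [pvDins_length]
  by_cases hc : fame.length + 1 ≤ k.toNat
  · rw [if_neg (by rw [hlen1]; omega), List.take_of_length_le (by rw [pvDins_length]; omega)]
  · have hfl : fame.length = k.toNat := by omega
    rw [if_pos (by rw [hlen1]; omega)]
    have hne : (pvDins s fame).reverse ≠ [] := by
      intro h0; rw [h0] at hlen1; simp at hlen1
    obtain ⟨x, xs, hx⟩ := List.exists_cons_of_ne_nil hne
    rw [hx, PySem.List.pop?_zero_cons]
    have htail : xs = (pvDins s fame).reverse.tail := by rw [hx]; rfl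
    rw [Option.map_some, Option.getD_some, htail, List.tail_reverse,
      List.dropLast_eq_take, pvDins_length]
    simp [hfl]

lemma pvLast_eq {l : List Int} (h : l ≠ []) :
    PySem.List.pyGetD l (-1) 0 = PySem.List.pyGetD l.reverse 0 0 := by
  rw [PySem.List.pyGetD_neg_one l 0 h, PySem.List.pyGetD_zero]
  have hr : l.reverse ≠ [] := by simpa using h
  have h0 : 0 < l.reverse.length := by simpa using List.length_pos_iff.mpr hr
  rw [List.getD_eq_getElem l.reverse 0 h0, List.getElem_zero, List.head_reverse]

lemma pvFold_eq {k : Int} (hk : 1 ≤ k) :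
    ∀ (score : List Int) (ans fame : List Int),
      fame.Pairwise (fun a b => b ≤ a) → fame.length ≤ k.toNat →
      (score.foldl (fun st s =>
        let fame := pvLoopA k.toNat 0 st.2 s
        (st.1 ++ [PySem.List.pyGetD fame (-1) 0], fame)) (ans, fame)).1
      = (score.foldl (fun st s =>
          let lo := pvBSearch st.2 s 0 st.2.length
          let fame1 := PySem.List.insert st.2 (lo : Int) s
          let fame2 := if k < (fame1.length : Int) then
              ((PySem.List.pop? fame1 0).map Prod.snd).getD fame1 else fame1
          (st.1 ++ [PySem.List.pyGetD fame2 0 0], fame2)) (ans, fame.reverse)).1 := by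
  intro score
  induction score with
  | nil => intro ans fame _ _; rfl
  | cons s rest ih =>
    intro ans fame hs hlen
    simp only [List.foldl_cons]
    rw [pvLoopA_eq s hs hlen, pvStepB_eq hk hs hlen s]
    have hTne : (pvDins s fame).take k.toNat ≠ [] := by
      have h1 := pvDins_length s fame
      intro h0
      have := congrArg List.length h0
      simp [h1] at this
      omega
    rw [← pvLast_eq hTne]
    exact ih _ _ ((pvDins_pairwise hs).sublist (List.take_sublist _ _))
      (by simp)

-- ===== VERDICT (by name: the statement is the Claim_ definition above) =====
theorem solution_spec : Claim_equal_solution := by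
  intro k score _ hpre
  unfold Spec_solution solution solution_alt
  rcases hpre with hk | rfl
  · simpa using pvFold_eq hk score [] [] (by simp) (by simp)
  · rfl
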